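-- pv_equiv track=rewrite | github.com/MaxHartel/Project-Parlay | Project-Parlay/Testing/value.py | parlaySizeStep
-- ===== SOURCE A (Python) =====
-- import itertools
-- import copy
--
-- def parlaySizeStep(bins):
--     size = len(bins)
--     allShapesForCombo = []
--     newList = []
--
--     for i in range(16):
--         for combo in itertools.combinations_with_replacement(range(size),i):
--             newList = copy.deepcopy(bins)
--             for indexElement in combo:
--                 newList[indexElement].append('x')
--
--             allShapesForCombo.append(newList)
--
--     return allShapesForCombo
-- ===== SOURCE B (Python) =====
-- def parlaySizeStep(bins):
--     result = []
--
--     def rec(rest, remaining, acc):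
--         if not rest:
--             if remaining == 0:
--                 result.append(acc)
--             return
--         first, tail = rest[0], rest[1:]
--         for c in range(remaining, -1, -1):
--             rec(tail, remaining - c, acc + [first + ['x'] * c])
--
--     for t in range(16):
--         rec(bins, t, [])
--     return result
-- ===== Notes on version B (the rewrite author's own statement) =====
-- stated objective: alternative
-- what changed: Replaces itertools.combinations_with_replacement plus a per-combo deepcopy of all bins with a direct recursion over bins that enumerates per-bin counts (descending at each bin) and builds each output shape once, copy-free.
import Mathlib
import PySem

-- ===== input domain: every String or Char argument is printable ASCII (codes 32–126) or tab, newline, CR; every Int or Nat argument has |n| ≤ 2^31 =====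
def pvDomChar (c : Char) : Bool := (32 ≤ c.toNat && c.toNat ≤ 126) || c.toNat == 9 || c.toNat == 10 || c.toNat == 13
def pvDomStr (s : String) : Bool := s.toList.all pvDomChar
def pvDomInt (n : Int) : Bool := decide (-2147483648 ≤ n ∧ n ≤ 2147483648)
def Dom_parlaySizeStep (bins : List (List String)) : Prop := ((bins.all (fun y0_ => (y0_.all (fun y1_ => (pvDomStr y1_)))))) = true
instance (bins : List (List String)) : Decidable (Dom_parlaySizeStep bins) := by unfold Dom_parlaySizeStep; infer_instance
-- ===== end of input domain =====

-- B replaces itertools.combinations_with_replacement + per-combo deepcopy with a direct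
-- recursive enumeration of per-bin counts (descending at each bin), building each shape
-- bottom-up without copying the whole input per combo (objective: alternative algorithm).

-- ===== PORT A =====
-- itertools.combinations_with_replacement(xs, n) in lexicographic order (literal helper):
-- cwr(x::rest, n) = [x::t for t in cwr(x::rest, n-1)] ++ cwr(rest, n)
def cwrAux (xs : List Nat) (n : Nat) : List (List Nat) :=
  match n, xs with
  | 0, _ => [[]]
  | _ + 1, [] => []
  | n + 1, x :: rest => (cwrAux (x :: rest) n).map (fun t => x :: t) ++ cwrAux rest (n + 1)
  termination_by (n, xs.length)

-- newList[indexElement].append('x')  (indexElement is always a valid index, from range(size))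
def pvAppendAt (nl : List (List String)) (idx : Nat) : List (List String) :=
  nl.set idx (nl.getD idx [] ++ ["x"])

def parlaySizeStep (bins : List (List String)) : List (List (List String)) :=
  let size := bins.length
  (List.range 16).foldl (fun all i =>
    (cwrAux (List.range size) i).foldl (fun all2 combo =>
      all2 ++ [combo.foldl pvAppendAt bins]) all) []

-- ===== PORT B =====
-- range(remaining, -1, -1) : the values remaining, remaining-1, …, 0
def pvDownFrom : Nat → List Nat
  | 0 => [0]
  | n + 1 => (n + 1) :: pvDownFrom n

-- rec(rest, remaining, acc): emitted shapes, in emission order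
def pvAltRec (rest : List (List String)) (remaining : Nat) (acc : List (List String)) :
    List (List (List String)) :=
  match rest with
  | [] => if remaining = 0 then [acc] else []
  | first :: tail =>
      (pvDownFrom remaining).flatMap
        (fun c => pvAltRec tail (remaining - c) (acc ++ [first ++ List.replicate c "x"]))

def parlaySizeStep_alt (bins : List (List String)) : List (List (List String)) :=
  (List.range 16).flatMap (fun t => pvAltRec bins t [])

-- ===== PRECONDITION & SPEC =====
def Spec_parlaySizeStep (bins : List (List String)) (out : List (List (List String))) : Prop := out = parlaySizeStep_alt bins
instance (bins : List (List String)) (out : List (List (List String))) : Decidable (Spec_parlaySizeStep bins out) := by unfold Spec_parlaySizeStep; infer_instance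

-- ===== CLAIM (what is proved, stated in full; the proofs are below) =====
def Claim_equal_parlaySizeStep : Prop := ∀ (bins : List (List String)), Dom_parlaySizeStep bins → Spec_parlaySizeStep bins (parlaySizeStep bins)

-- ===== LEMMAS AND PROOFS =====

-- canonical family both sides reduce to: all shapes distributing t 'x's over bins
def pvShapes (bs : List (List String)) (t : Nat) : List (List (List String)) :=
  match bs with
  | [] => if t = 0 then [[]] else []
  | b :: rest =>
      (pvDownFrom t).flatMap
        (fun c => (pvShapes rest (t - c)).map (fun l => (b ++ List.replicate c "x") :: l))

theorem pvDownFrom_succ (n : Nat) :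
    pvDownFrom (n + 1) = (pvDownFrom n).map (· + 1) ++ [0] := by
  induction n with
  | zero => rfl
  | succ m ih =>
      calc pvDownFrom (m + 2) = (m + 2) :: pvDownFrom (m + 1) := rfl
        _ = (m + 2) :: ((pvDownFrom m).map (· + 1) ++ [0]) := by rw [ih]
        _ = ((m + 1) :: pvDownFrom m).map (· + 1) ++ [0] := by simp
        _ = (pvDownFrom (m + 1)).map (· + 1) ++ [0] := rfl

theorem cwrAux_canonical (x : Nat) (rest : List Nat) (n : Nat) :
    cwrAux (x :: rest) n =
      (pvDownFrom n).flatMap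
        (fun c => (cwrAux rest (n - c)).map (fun t => List.replicate c x ++ t)) := by
  induction n with
  | zero => simp [cwrAux, pvDownFrom]
  | succ m ih =>
      rw [show cwrAux (x :: rest) (m + 1)
            = (cwrAux (x :: rest) m).map (fun t => x :: t) ++ cwrAux rest (m + 1)
          from by rw [cwrAux]]
      rw [ih, List.map_flatMap, pvDownFrom_succ, List.flatMap_append, List.flatMap_map]
      simp [List.map_map, Function.comp_def, List.replicate_succ, Nat.add_sub_add_right]

theorem cwrAux_map_succ (xs : List Nat) (n : Nat) :
    cwrAux (xs.map Nat.succ) n = (cwrAux xs n).map (fun t => t.map Nat.succ) := by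
  induction xs generalizing n with
  | nil => cases n <;> simp [cwrAux]
  | cons x rest ihx =>
      induction n with
      | zero => simp [cwrAux]
      | succ m ihn =>
          rw [show (x :: rest).map Nat.succ = Nat.succ x :: rest.map Nat.succ from rfl] at ihn ⊢
          rw [cwrAux, cwrAux, ihn, ihx]
          simp [List.map_map, Function.comp_def]

theorem foldl_pvAppendAt_replicate_zero (c : Nat) (b : List String) (bs : List (List String)) :
    (List.replicate c 0).foldl pvAppendAt (b :: bs) = (b ++ List.replicate c "x") :: bs := by
  induction c generalizing b with
  | zero => simp
  | succ m ih =>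
      rw [List.replicate_succ, List.foldl_cons]
      rw [show pvAppendAt (b :: bs) 0 = (b ++ ["x"]) :: bs from rfl, ih]
      simp [List.replicate_succ]

theorem foldl_pvAppendAt_map_succ (combo : List Nat) (hd : List String) (tl : List (List String)) :
    (combo.map Nat.succ).foldl pvAppendAt (hd :: tl) = hd :: combo.foldl pvAppendAt tl := by
  induction combo generalizing tl with
  | nil => rfl
  | cons i rest ih =>
      rw [List.map_cons, List.foldl_cons, List.foldl_cons]
      rw [show pvAppendAt (hd :: tl) (Nat.succ i) = hd :: pvAppendAt tl i from rfl, ih]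

theorem a_core_eq_shapes (bins : List (List String)) (t : Nat) :
    (cwrAux (List.range bins.length) t).map (fun combo => combo.foldl pvAppendAt bins)
      = pvShapes bins t := by
  induction bins generalizing t with
  | nil =>
      cases t with
      | zero => simp [cwrAux, pvShapes]
      | succ m => simp [cwrAux, pvShapes]
  | cons b bs ih =>
      rw [show (b :: bs).length = bs.length + 1 from rfl, List.range_succ_eq_map,
        cwrAux_canonical, pvShapes, List.map_flatMap]
      apply List.flatMap_congr
      intro c _
      rw [cwrAux_map_succ, List.map_map, List.map_map, ← ih (t - c), List.map_map]
      apply List.map_congr_left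
      intro combo _
      show (List.replicate c 0 ++ combo.map Nat.succ).foldl pvAppendAt (b :: bs)
        = (b ++ List.replicate c "x") :: combo.foldl pvAppendAt bs
      rw [List.foldl_append, foldl_pvAppendAt_replicate_zero, foldl_pvAppendAt_map_succ]

theorem altRec_eq_shapes (bs : List (List String)) (t : Nat) (acc : List (List String)) :
    pvAltRec bs t acc = (pvShapes bs t).map (fun l => acc ++ l) := by
  induction bs generalizing t acc with
  | nil => cases t with
    | zero => simp [pvAltRec, pvShapes]
    | succ m => simp [pvAltRec, pvShapes]
  | cons b rest ih =>
      rw [pvAltRec, pvShapes, List.map_flatMap]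
      apply List.flatMap_congr
      intro c _
      rw [ih, List.map_map]
      apply List.map_congr_left
      intro l _
      simp

-- ===== VERDICT (by name: the statement is the Claim_ definition above) =====
theorem parlaySizeStep_spec : Claim_equal_parlaySizeStep := by
  intro bins _
  show parlaySizeStep bins = parlaySizeStep_alt bins
  rw [parlaySizeStep, parlaySizeStep_alt]
  rw [show (fun all i =>
        (cwrAux (List.range bins.length) i).foldl (fun all2 combo =>
          all2 ++ [combo.foldl pvAppendAt bins]) all)
      = (fun all i => all ++
          (cwrAux (List.range bins.length) i).map (fun combo => combo.foldl pvAppendAt bins))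
    from by funext all i; rw [PySem.List.foldl_append_singleton_eq_map]]
  rw [PySem.List.foldl_append_eq_flatMap, List.nil_append]
  apply List.flatMap_congr
  intro t _
  rw [a_core_eq_shapes, altRec_eq_shapes]
  simp
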